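-- pv_equiv track=rewrite | github.com/piotrszyma/studies-data-mining | word-count-problem/main.py | split_into_chapters
-- ===== SOURCE A (Python) =====
-- from typing import Text, Sequence
--
-- def split_into_chapters(lines: Sequence[Text]) -> Sequence[Text]:
--     group = []
--
--     for line in lines:
--
--         if line.startswith("Chapter") and group:
--             yield group
--             group = []
--
--         group.append(line)
--
--     if group:
--         yield group
-- ===== SOURCE B (Python) =====
-- from typing import Text, Sequence
--
-- def split_into_chapters(lines: Sequence[Text]) -> Sequence[Text]:
--     # Single backward pass: build the groups right-to-left; a line starts a new
--     # group exactly when the group built so far begins with a "Chapter" line.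
--     groups = []
--     for line in reversed(list(lines)):
--         if groups and not groups[0][0].startswith("Chapter"):
--             groups[0].insert(0, line)
--         else:
--             groups.insert(0, [line])
--     yield from groups
-- ===== Notes on version B (the rewrite author's own statement) =====
-- stated objective: alternative
-- what changed: Replaces A's forward accumulate-and-flush generator (mutable current group, flush on each later 'Chapter' line and at the end) with a single backward pass that builds the group list right-to-left, starting a new group exactly when the groups built so far begin with a 'Chapter' line.
import Mathlib
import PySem

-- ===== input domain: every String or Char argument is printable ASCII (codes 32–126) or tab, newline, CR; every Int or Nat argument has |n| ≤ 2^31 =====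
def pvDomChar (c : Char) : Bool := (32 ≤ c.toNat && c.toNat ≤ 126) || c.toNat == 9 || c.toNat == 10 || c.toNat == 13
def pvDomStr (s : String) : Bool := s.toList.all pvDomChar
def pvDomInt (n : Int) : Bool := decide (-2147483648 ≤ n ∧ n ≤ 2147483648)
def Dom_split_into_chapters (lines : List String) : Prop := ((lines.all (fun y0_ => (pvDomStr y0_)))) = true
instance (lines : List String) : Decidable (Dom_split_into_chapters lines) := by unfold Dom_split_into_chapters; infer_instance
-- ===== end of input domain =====

-- B replaces A's forward accumulate-and-flush loop by a single backward pass that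
-- builds the group list right-to-left (objective: alternative decomposition, same cost).

-- ===== PORT A =====
-- the loop body: on a "Chapter" line with a nonempty current group, flush it and start anew
def stepA (p : List (List String) × List String) (line : String) :
    List (List String) × List String :=
  if PySem.Str.startswith line "Chapter" && !p.2.isEmpty then
    (p.1 ++ [p.2], [line])
  else
    (p.1, p.2 ++ [line])

-- after the loop: 'if group: yield group'
def finishA (st : List (List String) × List String) : List (List String) :=
  if !st.2.isEmpty then st.1 ++ [st.2] else st.1

def split_into_chapters (lines : List String) : List (List String) :=
  finishA (lines.foldl stepA ([], []))

-- ===== PORT B =====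
-- backward loop body: prepend line to the first group unless that group starts with a "Chapter" line
def stepB (line : String) (groups : List (List String)) : List (List String) :=
  match groups with
  | g :: gs =>
      if !(PySem.Str.startswith (g.headD "") "Chapter") then (line :: g) :: gs
      else [line] :: g :: gs
  | [] => [[line]]

def split_into_chapters_alt (lines : List String) : List (List String) :=
  lines.foldr stepB []

-- ===== PRECONDITION & SPEC =====
def Spec_split_into_chapters (lines : List String) (out : List (List String)) : Prop := out = split_into_chapters_alt lines
instance (lines : List String) (out : List (List String)) : Decidable (Spec_split_into_chapters lines out) := by unfold Spec_split_into_chapters; infer_instance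

-- ===== CLAIM (what is proved, stated in full; the proofs are below) =====
def Claim_equal_split_into_chapters : Prop := ∀ (lines : List String), Dom_split_into_chapters lines → Spec_split_into_chapters lines (split_into_chapters lines)

-- ===== LEMMAS AND PROOFS =====

-- forward recursive view of A's loop, given a nonempty current group
def goA (group : List String) : List String → List (List String)
  | [] => [group]
  | l :: ls =>
      if PySem.Str.startswith l "Chapter" then group :: goA [l] ls
      else goA (group ++ [l]) ls

-- prepend a pending (nonempty) group onto B's result for the remaining lines
def mergeB (group : List String) (bs : List (List String)) : List (List String) :=
  match bs with
  | [] => [group]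
  | g :: gs =>
      if PySem.Str.startswith (g.headD "") "Chapter" then group :: g :: gs
      else (group ++ g) :: gs

theorem foldl_stepA_goA (ls : List String) :
    ∀ (acc : List (List String)) (group : List String), group ≠ [] →
      finishA (ls.foldl stepA (acc, group)) = acc ++ goA group ls := by
  induction ls with
  | nil =>
      intro acc group h
      simp [finishA, goA, h]
  | cons l ls ih =>
      intro acc group h
      have hne : group.isEmpty = false := by simp [h]
      rw [List.foldl_cons]
      by_cases hs : PySem.Str.startswith l "Chapter"
      all_goals simp only [PySem.Str.startswith,
        show "Chapter".toList = ['C','h','a','p','t','e','r'] from rfl] at hs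
      · have hst : stepA (acc, group) l = (acc ++ [group], [l]) := by
          simp only [stepA, PySem.Str.startswith]
          simp [hs, hne]
        rw [hst, ih (acc ++ [group]) [l] (by simp), goA]
        simp only [PySem.Str.startswith]
        simp [hs]
      · have hst : stepA (acc, group) l = (acc, group ++ [l]) := by
          simp only [stepA, PySem.Str.startswith]
          simp [hs, hne]
        rw [hst, ih acc (group ++ [l]) (by simp), goA]
        simp only [PySem.Str.startswith]
        simp [hs]

theorem goA_mergeB (ls : List String) :
    ∀ (group : List String), goA group ls = mergeB group (split_into_chapters_alt ls) := by
  induction ls with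
  | nil => intro group; simp [goA, split_into_chapters_alt, mergeB]
  | cons l ls ih =>
      intro group
      rw [goA]
      have halt : split_into_chapters_alt (l :: ls) = stepB l (split_into_chapters_alt ls) := by
        simp [split_into_chapters_alt]
      rw [halt]
      cases hb : split_into_chapters_alt ls with
      | nil =>
          simp only [ih, hb, stepB, mergeB]
          simp
      | cons g gs =>
          simp only [ih, hb, stepB, mergeB]
          split_ifs <;> simp_all [mergeB] <;> split_ifs <;> simp_all

theorem mergeB_singleton (l : String) (bs : List (List String)) :
    mergeB [l] bs = stepB l bs := by
  cases bs with
  | nil => rfl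
  | cons g gs =>
      simp only [mergeB, stepB]
      split_ifs <;> simp_all

-- ===== VERDICT (by name: the statement is the Claim_ definition above) =====
theorem split_into_chapters_spec : Claim_equal_split_into_chapters := by
  intro lines _
  unfold Spec_split_into_chapters
  cases lines with
  | nil => rfl
  | cons l ls =>
      have h1 : split_into_chapters (l :: ls) = finishA (ls.foldl stepA ([], [l])) := by
        simp [split_into_chapters, stepA]
      rw [h1, foldl_stepA_goA ls [] [l] (by simp), List.nil_append, goA_mergeB,
        mergeB_singleton]
      simp [split_into_chapters_alt]
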